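-- pv_equiv track=rewrite | github.com/Ta-Pc/AI-Snake-Game | Search.py | count_actions
-- ===== SOURCE A (Python) =====
-- def count_actions(solution):
--     up = 0
--     down = 0
--     left = 0
--     right = 0
--     for action in solution:
--         if action == "UP":
--             up += 1
--         elif action == "DOWN":
--             down += 1
--         elif action == "LEFT":
--             left += 1
--         elif action == "RIGHT":
--             right += 1
--     return up, down, left, right
-- ===== SOURCE B (Python) =====
-- def count_actions(solution):
--     solution = list(solution)
--     return (solution.count("UP"), solution.count("DOWN"),
--             solution.count("LEFT"), solution.count("RIGHT"))
-- ===== Notes on version B (the rewrite author's own statement) =====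
-- stated objective: simpler
-- what changed: Replaces the single accumulator loop with its if/elif chain by four independent list.count passes, one per direction, with no branching and no mutable state.
import Mathlib
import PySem

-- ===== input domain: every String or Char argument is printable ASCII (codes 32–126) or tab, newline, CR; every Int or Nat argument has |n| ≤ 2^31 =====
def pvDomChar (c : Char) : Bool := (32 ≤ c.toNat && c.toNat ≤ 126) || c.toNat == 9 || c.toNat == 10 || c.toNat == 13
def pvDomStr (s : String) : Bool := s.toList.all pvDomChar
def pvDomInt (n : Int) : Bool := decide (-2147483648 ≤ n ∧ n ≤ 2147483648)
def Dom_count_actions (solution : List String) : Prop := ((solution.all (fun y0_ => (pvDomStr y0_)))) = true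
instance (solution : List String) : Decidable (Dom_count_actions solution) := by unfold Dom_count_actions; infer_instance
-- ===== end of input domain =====

-- B replaces A's single accumulator loop with its if/elif chain by four independent
-- list.count passes, one per direction (simpler; same O(n) cost over four passes).


-- ===== PORT A =====
-- one iteration of A's for-loop: the if/elif chain updating the four accumulators
def countA_step (st : Int × Int × Int × Int) (action : String) : Int × Int × Int × Int :=
  if action == "UP" then (st.1 + 1, st.2.1, st.2.2.1, st.2.2.2)
  else if action == "DOWN" then (st.1, st.2.1 + 1, st.2.2.1, st.2.2.2)
  else if action == "LEFT" then (st.1, st.2.1, st.2.2.1 + 1, st.2.2.2)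
  else if action == "RIGHT" then (st.1, st.2.1, st.2.2.1, st.2.2.2 + 1)
  else st

def count_actions (solution : List String) : Int × Int × Int × Int :=
  solution.foldl countA_step (0, 0, 0, 0)

-- ===== PORT B =====
-- four independent list.count passes (PySem.List.count = Python's list.count)
def count_actions_alt (solution : List String) : Int × Int × Int × Int :=
  (PySem.List.count solution "UP", PySem.List.count solution "DOWN",
   PySem.List.count solution "LEFT", PySem.List.count solution "RIGHT")

-- ===== PRECONDITION & SPEC =====
def Spec_count_actions (solution : List String) (out : Int × Int × Int × Int) : Prop := out = count_actions_alt solution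
instance (solution : List String) (out : Int × Int × Int × Int) : Decidable (Spec_count_actions solution out) := by unfold Spec_count_actions; infer_instance

-- ===== CLAIM =====
def Claim_equal_count_actions : Prop := ∀ (solution : List String), Dom_count_actions solution → Spec_count_actions solution (count_actions solution)

-- ===== LEMMAS AND PROOFS =====

-- the four action strings are mutually exclusive, so one step adds at most one indicator
theorem countA_step_eq (st : Int × Int × Int × Int) (a : String) :
    countA_step st a =
      (st.1 + (if a = "UP" then 1 else 0), st.2.1 + (if a = "DOWN" then 1 else 0),
       st.2.2.1 + (if a = "LEFT" then 1 else 0), st.2.2.2 + (if a = "RIGHT" then 1 else 0)) := by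
  unfold countA_step
  by_cases h1 : a = "UP" <;> by_cases h2 : a = "DOWN" <;> by_cases h3 : a = "LEFT" <;>
    by_cases h4 : a = "RIGHT" <;> simp_all

-- A's accumulator loop, started from any state, adds the four occurrence counts componentwise
theorem countA_foldl (solution : List String) (u d l r : Int) :
    solution.foldl countA_step (u, d, l, r)
      = (u + solution.count "UP", d + solution.count "DOWN",
         l + solution.count "LEFT", r + solution.count "RIGHT") := by
  induction solution generalizing u d l r with
  | nil => simp
  | cons a t ih =>
    rw [List.foldl_cons, countA_step_eq, ih]
    simp only [List.count_cons, beq_iff_eq, Prod.mk.injEq]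
    refine ⟨?_, ?_, ?_, ?_⟩ <;> split_ifs <;> push_cast <;> ring

-- ===== VERDICT =====
theorem count_actions_spec : Claim_equal_count_actions := by
  intro solution _
  unfold Spec_count_actions count_actions count_actions_alt
  simp [PySem.List.count_eq, countA_foldl]
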